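-- pv_equiv track=rewrite | github.com/kvcache-ai/ktransformers | kt-kernel/scripts/convert_moe_to_bf16.py | _is_quantized_weight_key
-- ===== SOURCE A (Python) =====
-- def _is_quantized_weight_key(key: str) -> bool:
--     if ".mlp.experts." not in key or ".shared_experts." in key:
--         return False
--     suffixes = ("weight_packed", "weight_scale", "weight_shape")
--     for proj in ("gate_proj", "up_proj", "down_proj"):
--         for suffix in suffixes:
--             if key.endswith(f".{proj}.{suffix}"):
--                 return True
--     return False
-- ===== SOURCE B (Python) =====
-- def _is_quantized_weight_key(key: str) -> bool:
--     if ".mlp.experts." not in key or ".shared_experts." in key: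
--         return False
--     parts = key.rsplit(".", 2)
--     return (len(parts) == 3
--             and parts[1] in ("gate_proj", "up_proj", "down_proj")
--             and parts[2] in ("weight_packed", "weight_scale", "weight_shape"))
-- ===== Notes on version B (the rewrite author's own statement) =====
-- stated objective: idiomatic
-- what changed: Replaces A's nested loop over nine generated dot-joined proj/suffix endswith candidates by a single rsplit (maxsplit 2) parse of the key's last two dot-separated components followed by two set-membership tests.
import Mathlib
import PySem

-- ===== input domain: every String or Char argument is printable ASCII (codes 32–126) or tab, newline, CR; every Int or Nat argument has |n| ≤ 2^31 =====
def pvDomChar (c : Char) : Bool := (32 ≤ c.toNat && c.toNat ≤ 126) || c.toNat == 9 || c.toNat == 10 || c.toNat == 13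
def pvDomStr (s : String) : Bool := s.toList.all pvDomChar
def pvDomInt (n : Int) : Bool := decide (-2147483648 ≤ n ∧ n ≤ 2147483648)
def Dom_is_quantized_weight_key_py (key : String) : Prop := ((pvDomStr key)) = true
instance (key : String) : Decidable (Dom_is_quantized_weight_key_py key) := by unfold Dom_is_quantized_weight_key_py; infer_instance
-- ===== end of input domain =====

-- B replaces A's 9-candidate endswith loop by one rsplit('.', 2) parse of the last two
-- dot components plus set membership (objective: idiomatic / alternative, not faster).

-- ===== PORT A =====
-- f".{proj}.{suffix}" is built on the char-list level ('.' :: … ++ '.' :: …), exact for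
-- these ASCII literals (Lean's String.append is kernel-opaque, so the port avoids it).
def is_quantized_weight_key_py (key : String) : Bool :=
  if !(PySem.Str.isIn ".mlp.experts." key) || PySem.Str.isIn ".shared_experts." key then
    false
  else
    ["gate_proj", "up_proj", "down_proj"].any fun proj =>
      ["weight_packed", "weight_scale", "weight_shape"].any fun suffix =>
        PySem.Chars.endswith key.toList ('.' :: proj.toList ++ '.' :: suffix.toList)

-- ===== PORT B =====
-- hand port of Python's key.rsplit(".", 2) (PySem has no rsplit): peel at most two
-- '.'-separated components off the reversed char list; exact for every string.
def pvRsplitDot2 (cs : List Char) : List (List Char) :=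
  let r := cs.reverse
  let a := r.takeWhile (· ≠ '.')
  match r.dropWhile (· ≠ '.') with
  | [] => [cs]
  | _ :: r1 =>
    let b := r1.takeWhile (· ≠ '.')
    match r1.dropWhile (· ≠ '.') with
    | [] => [b.reverse, a.reverse]
    | _ :: r2 => [r2.reverse, b.reverse, a.reverse]

def is_quantized_weight_key_py_alt (key : String) : Bool :=
  if !(PySem.Str.isIn ".mlp.experts." key) || PySem.Str.isIn ".shared_experts." key then
    false
  else
    match pvRsplitDot2 key.toList with
    | [_, p, t] =>
        ["gate_proj", "up_proj", "down_proj"].contains (String.ofList p) &&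
        ["weight_packed", "weight_scale", "weight_shape"].contains (String.ofList t)
    | _ => false

-- ===== PRECONDITION & SPEC =====
def Spec_is_quantized_weight_key_py (key : String) (out : Bool) : Prop := out = is_quantized_weight_key_py_alt key
instance (key : String) (out : Bool) : Decidable (Spec_is_quantized_weight_key_py key out) := by unfold Spec_is_quantized_weight_key_py; infer_instance

-- ===== CLAIM (what is proved, stated in full; the proofs are below) =====
def Claim_equal_is_quantized_weight_key_py : Prop := ∀ (key : String), Dom_is_quantized_weight_key_py key → Spec_is_quantized_weight_key_py key (is_quantized_weight_key_py key)

-- ===== LEMMAS AND PROOFS =====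

-- pure propositional distribution of the 9-fold disjunction
theorem pv_distrib (P1 P2 P3 T1 T2 T3 : Prop) :
    ((P1 ∧ T1 ∨ P1 ∧ T2 ∨ P1 ∧ T3) ∨ (P2 ∧ T1 ∨ P2 ∧ T2 ∨ P2 ∧ T3) ∨
        P3 ∧ T1 ∨ P3 ∧ T2 ∨ P3 ∧ T3) ↔
      ((P1 ∨ P2 ∨ P3) ∧ (T1 ∨ T2 ∨ T3)) := by
  tauto

-- the head surviving dropWhile (· ≠ '.') is a dot
theorem pv_dot_head {l : List Char} {c : Char} {tl : List Char}
    (h : l.dropWhile (· ≠ '.') = c :: tl) : c = '.' := by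
  have := List.head_dropWhile_not (p := fun c => decide (c ≠ '.')) (l := l)
    (by rw [h]; exact List.cons_ne_nil _ _)
  simp only [h, List.head_cons] at this
  simpa using this

-- a ++ b is a prefix iff a is and b is a prefix of the remainder
theorem pv_prefix_append_iff {α : Type} (l1 l2 r : List α) :
    l1 ++ l2 <+: r ↔ l1 <+: r ∧ l2 <+: r.drop l1.length := by
  constructor
  · rintro ⟨u, hu⟩
    subst hu
    refine ⟨⟨l2 ++ u, by simp⟩, ?_⟩
    simp
  · rintro ⟨h1, ⟨u, hu⟩⟩
    rcases h1 with ⟨v, hv⟩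
    subst hv
    simp only [List.drop_append] at hu
    simp at hu
    exact ⟨u, by simp [← hu]⟩

-- a dot-free block followed by '.' is a prefix iff the block is exactly the maximal
-- dot-free prefix and a dot follows it
theorem pv_pref_dot (r x : List Char) (hx : '.' ∉ x) :
    x ++ ['.'] <+: r ↔ r.takeWhile (· ≠ '.') = x ∧ r.dropWhile (· ≠ '.') ≠ [] := by
  have hall : ∀ a ∈ x, (fun a => decide (a ≠ '.')) a = true := by
    intro a ha; simp; rintro rfl; exact hx ha
  constructor
  · rintro ⟨u, hu⟩
    subst hu
    have htx : List.takeWhile (fun a => decide (a ≠ '.')) x = x :=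
      List.takeWhile_eq_self_iff.mpr hall
    have hdx : List.dropWhile (fun a => decide (a ≠ '.')) x = [] :=
      List.dropWhile_eq_nil_iff.mpr hall
    constructor
    · rw [List.append_assoc, List.takeWhile_append, htx]
      simp
    · rw [List.append_assoc, List.dropWhile_append, hdx]
      simp
  · rintro ⟨ht, hd⟩
    rcases hdw : r.dropWhile (· ≠ '.') with _ | ⟨c, tl⟩
    · exact absurd hdw hd
    · have hc : c = '.' := pv_dot_head hdw
      subst hc
      refine ⟨tl, ?_⟩
      conv_rhs => rw [← List.takeWhile_append_dropWhile (p := fun a => decide (a ≠ '.')) (l := r)]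
      rw [ht, hdw]
      simp
-- characterisation of A's endswith test through B's reversed-takeWhile parse
theorem pv_endsw (cs p t : List Char) (hp : '.' ∉ p) (ht : '.' ∉ t) :
    PySem.Chars.endswith cs ('.' :: p ++ '.' :: t) = true ↔
      (cs.reverse.takeWhile (· ≠ '.') = t.reverse ∧
       ∃ r1, cs.reverse.dropWhile (· ≠ '.') = '.' :: r1 ∧
         r1.takeWhile (· ≠ '.') = p.reverse ∧ r1.dropWhile (· ≠ '.') ≠ []) := by
  rw [PySem.Chars.endswith_iff, ← List.reverse_prefix]
  have hpat : ('.' :: p ++ '.' :: t).reverse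
      = (t.reverse ++ ['.']) ++ (p.reverse ++ ['.']) := by simp
  rw [hpat, pv_prefix_append_iff,
      pv_pref_dot _ _ (by simpa using ht)]
  constructor
  · rintro ⟨⟨htw, hdw⟩, hpre⟩
    rcases hd : cs.reverse.dropWhile (· ≠ '.') with _ | ⟨c, r1⟩
    · exact absurd hd hdw
    · have hc : c = '.' := pv_dot_head hd
      subst hc
      have hdrop : cs.reverse.drop (t.reverse ++ ['.']).length = r1 := by
        conv_lhs => rw [← List.takeWhile_append_dropWhile
          (p := fun a => decide (a ≠ '.')) (l := cs.reverse)]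
        rw [htw, hd, show t.reverse ++ '.' :: r1 = (t.reverse ++ ['.']) ++ r1 from by simp,
           List.drop_left]
      rw [hdrop, pv_pref_dot _ _ (by simpa using hp)] at hpre
      exact ⟨htw, r1, rfl, hpre.1, hpre.2⟩
  · rintro ⟨htw, r1, hd, hres⟩
    refine ⟨⟨htw, by rw [hd]; exact List.cons_ne_nil _ _⟩, ?_⟩
    have hdrop : cs.reverse.drop (t.reverse ++ ['.']).length = r1 := by
      conv_lhs => rw [← List.takeWhile_append_dropWhile
        (p := fun a => decide (a ≠ '.')) (l := cs.reverse)]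
      rw [htw, hd, show t.reverse ++ '.' :: r1 = (t.reverse ++ ['.']) ++ r1 from by simp,
         List.drop_left]
    rw [hdrop, pv_pref_dot _ _ (by simpa using hp)]
    exact hres

-- String.ofList versus a string literal
theorem pv_ofList_eq_lit (l : List Char) (s : String) :
    String.ofList l = s ↔ l = s.toList := by
  constructor
  · intro h; have := congrArg String.toList h; simpa using this
  · rintro rfl; exact String.ofList_toList ▸ rfl

-- ===== VERDICT (by name: the statement is the Claim_ definition above) =====
set_option maxHeartbeats 1000000 in
theorem is_quantized_weight_key_py_spec : Claim_equal_is_quantized_weight_key_py := by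
  intro key _
  unfold Spec_is_quantized_weight_key_py
  unfold is_quantized_weight_key_py is_quantized_weight_key_py_alt pvRsplitDot2
  split_ifs with hguard
  · rfl
  · simp only [List.any_cons, List.any_nil, Bool.or_false]
    rcases hd : key.toList.reverse.dropWhile (· ≠ '.') with _ | ⟨c, r1⟩
    · -- no dot at all: every endswith is false, B sees one part
      have hf : ∀ p t : List Char, '.' ∉ p → '.' ∉ t →
          PySem.Chars.endswith key.toList ('.' :: p ++ '.' :: t) = false := by
        intro p t hp ht
        rw [Bool.eq_false_iff, ne_eq, pv_endsw _ _ _ hp ht]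
        rintro ⟨-, r1, h1, -⟩
        rw [hd] at h1; simp at h1
      rw [hf "gate_proj".toList "weight_packed".toList (by decide) (by decide),
          hf "gate_proj".toList "weight_scale".toList (by decide) (by decide),
          hf "gate_proj".toList "weight_shape".toList (by decide) (by decide),
          hf "up_proj".toList "weight_packed".toList (by decide) (by decide),
          hf "up_proj".toList "weight_scale".toList (by decide) (by decide),
          hf "up_proj".toList "weight_shape".toList (by decide) (by decide),
          hf "down_proj".toList "weight_packed".toList (by decide) (by decide),
          hf "down_proj".toList "weight_scale".toList (by decide) (by decide),
          hf "down_proj".toList "weight_shape".toList (by decide) (by decide)]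
      simp
    · have hc : c = '.' := pv_dot_head hd
      subst hc
      rcases hd2 : r1.dropWhile (· ≠ '.') with _ | ⟨c2, r2⟩
      · -- exactly one dot from the back: B sees two parts, A's tests all fail
        have hf : ∀ p t : List Char, '.' ∉ p → '.' ∉ t →
            PySem.Chars.endswith key.toList ('.' :: p ++ '.' :: t) = false := by
          intro p t hp ht
          rw [Bool.eq_false_iff, ne_eq, pv_endsw _ _ _ hp ht]
          rintro ⟨-, r1', h1, -, hne⟩
          rw [hd] at h1
          injection h1 with _ h1'
          subst h1'
          exact hne hd2
        rw [hf "gate_proj".toList "weight_packed".toList (by decide) (by decide),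
            hf "gate_proj".toList "weight_scale".toList (by decide) (by decide),
            hf "gate_proj".toList "weight_shape".toList (by decide) (by decide),
            hf "up_proj".toList "weight_packed".toList (by decide) (by decide),
            hf "up_proj".toList "weight_scale".toList (by decide) (by decide),
            hf "up_proj".toList "weight_shape".toList (by decide) (by decide),
            hf "down_proj".toList "weight_packed".toList (by decide) (by decide),
            hf "down_proj".toList "weight_scale".toList (by decide) (by decide),
            hf "down_proj".toList "weight_shape".toList (by decide) (by decide)]
        simp [show List.dropWhile (fun x => !decide (x = '.')) r1 = [] from by simpa using hd2]
      · -- at least two dots: A's 9-fold disjunction equals B's two membership tests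
        have key1 : ∀ p t : List Char, '.' ∉ p → '.' ∉ t →
            PySem.Chars.endswith key.toList ('.' :: p ++ '.' :: t)
              = (decide (r1.takeWhile (· ≠ '.') = p.reverse) &&
                 decide (key.toList.reverse.takeWhile (· ≠ '.') = t.reverse)) := by
          intro p t hp ht
          rw [Bool.eq_iff_iff, Bool.and_eq_true, decide_eq_true_eq, decide_eq_true_eq,
              pv_endsw _ _ _ hp ht]
          constructor
          · rintro ⟨h1, r1', h2, h3, -⟩
            rw [hd] at h2
            injection h2 with _ h2'
            subst h2'
            exact ⟨h3, h1⟩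
          · rintro ⟨h3, h1⟩
            exact ⟨h1, r1, hd, h3, by rw [hd2]; exact List.cons_ne_nil _ _⟩
        rw [key1 "gate_proj".toList "weight_packed".toList (by decide) (by decide),
            key1 "gate_proj".toList "weight_scale".toList (by decide) (by decide),
            key1 "gate_proj".toList "weight_shape".toList (by decide) (by decide),
            key1 "up_proj".toList "weight_packed".toList (by decide) (by decide),
            key1 "up_proj".toList "weight_scale".toList (by decide) (by decide),
            key1 "up_proj".toList "weight_shape".toList (by decide) (by decide),
            key1 "down_proj".toList "weight_packed".toList (by decide) (by decide),
            key1 "down_proj".toList "weight_scale".toList (by decide) (by decide),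
            key1 "down_proj".toList "weight_shape".toList (by decide) (by decide)]
        rw [Bool.eq_iff_iff]
        simp only [ne_eq, decide_not,
          show List.dropWhile (fun x => !decide (x = '.')) r1 = c2 :: r2 from by
            simpa using hd2,
          List.contains_cons, List.contains_nil, Bool.or_false, Bool.or_eq_true,
          Bool.and_eq_true, decide_eq_true_eq, beq_iff_eq, pv_ofList_eq_lit,
          List.reverse_eq_iff]
        exact pv_distrib _ _ _ _ _ _
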